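-- pv_equiv track=rewrite | github.com/SpartanerSpaten/BWINF2019_Round1 | Aufgabe5/rominos.py | __get_twists
-- ===== SOURCE A (Python) =====
-- def __get_twists(coords):                                 # get 1., 2. and 3. twist, including base
--     twist_1 = []                                                # + 90°
--     twist_2 = []                                                # + 180°
--     twist_3 = []                                                # - 90°
--     for x, y in coords:
--         twist_1.append((-y, x))
--         twist_2.append((-x, -y))
--         twist_3.append((y, -x))
--     return frozenset(coords), frozenset(twist_1), frozenset(twist_2), frozenset(twist_3)
-- ===== SOURCE B (Python) =====
-- def __get_twists(coords):
--     # Iterate a single 90-degree rotation three times instead of three parallel formulas.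
--     def rot90(pts):
--         return [(-y, x) for x, y in pts]
--     cur = list(coords)
--     out = [frozenset(cur)]
--     for _ in range(3):
--         cur = rot90(cur)
--         out.append(frozenset(cur))
--     return tuple(out)
-- ===== Notes on version B (the rewrite author's own statement) =====
-- stated objective: alternative
-- what changed: B replaces A's single loop computing three rotation formulas in parallel (three .append calls per point) with iterated application of one 90-degree rotation list comprehension (base, then rotate the previous rotated list three times).
import Mathlib
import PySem

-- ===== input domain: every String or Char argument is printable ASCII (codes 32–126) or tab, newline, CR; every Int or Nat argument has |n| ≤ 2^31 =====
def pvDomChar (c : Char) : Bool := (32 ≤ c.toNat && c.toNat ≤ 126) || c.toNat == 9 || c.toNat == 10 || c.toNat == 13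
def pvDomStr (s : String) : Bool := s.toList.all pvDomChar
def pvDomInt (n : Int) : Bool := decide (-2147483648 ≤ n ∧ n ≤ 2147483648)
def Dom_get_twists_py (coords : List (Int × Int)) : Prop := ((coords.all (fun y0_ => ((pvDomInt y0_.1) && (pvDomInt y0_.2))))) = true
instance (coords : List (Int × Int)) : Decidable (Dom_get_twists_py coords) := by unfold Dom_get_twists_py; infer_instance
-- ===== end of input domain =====

-- B iterates one 90° rotation three times instead of A's three parallel per-point formulas (objective: alternative decomposition).

-- ===== PORT A =====
-- A: one loop over coords appending (-y,x), (-x,-y), (y,-x) to three lists, then frozenset each.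
def get_twists_py (coords : List (Int × Int)) : (List (Int × Int)) × (List (Int × Int)) × (List (Int × Int)) × (List (Int × Int)) :=
  let acc := coords.foldl
    (fun (acc : List (Int × Int) × List (Int × Int) × List (Int × Int)) p =>
      (acc.1 ++ [(-p.2, p.1)], acc.2.1 ++ [(-p.1, -p.2)], acc.2.2 ++ [(p.2, -p.1)]))
    ([], [], [])
  (PySem.Set.ofList coords, PySem.Set.ofList acc.1, PySem.Set.ofList acc.2.1, PySem.Set.ofList acc.2.2)

-- ===== PORT B =====
def pvRot90 (pts : List (Int × Int)) : List (Int × Int) := pts.map (fun p => (-p.2, p.1))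

def get_twists_py_alt (coords : List (Int × Int)) : (List (Int × Int)) × (List (Int × Int)) × (List (Int × Int)) × (List (Int × Int)) :=
  let c1 := pvRot90 coords
  let c2 := pvRot90 c1
  let c3 := pvRot90 c2
  (PySem.Set.ofList coords, PySem.Set.ofList c1, PySem.Set.ofList c2, PySem.Set.ofList c3)

-- ===== PRECONDITION & SPEC =====
def Spec_get_twists_py (coords : List (Int × Int)) (out : (List (Int × Int)) × (List (Int × Int)) × (List (Int × Int)) × (List (Int × Int))) : Prop := out = get_twists_py_alt coords
instance (coords : List (Int × Int)) (out : (List (Int × Int)) × (List (Int × Int)) × (List (Int × Int)) × (List (Int × Int))) : Decidable (Spec_get_twists_py coords out) := by unfold Spec_get_twists_py; infer_instance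

-- ===== CLAIM (what is proved, stated in full; the proofs are below) =====
def Claim_equal_get_twists_py : Prop := ∀ (coords : List (Int × Int)), Dom_get_twists_py coords → Spec_get_twists_py coords (get_twists_py coords)

-- ===== LEMMAS AND PROOFS =====
theorem get_twists_foldl (coords : List (Int × Int)) (a b c : List (Int × Int)) :
    coords.foldl
      (fun (acc : List (Int × Int) × List (Int × Int) × List (Int × Int)) p =>
        (acc.1 ++ [(-p.2, p.1)], acc.2.1 ++ [(-p.1, -p.2)], acc.2.2 ++ [(p.2, -p.1)]))
      (a, b, c)
    = (a ++ coords.map (fun p => (-p.2, p.1)),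
       b ++ coords.map (fun p => (-p.1, -p.2)),
       c ++ coords.map (fun p => (p.2, -p.1))) := by
  induction coords generalizing a b c with
  | nil => simp
  | cons h t ih => simp [List.foldl, ih]

-- ===== VERDICT (by name: the statement is the Claim_ definition above) =====
theorem get_twists_py_spec : Claim_equal_get_twists_py := by
  intro coords _
  unfold Spec_get_twists_py get_twists_py get_twists_py_alt pvRot90
  simp [get_twists_foldl, List.map_map, Function.comp_def]
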